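-- pv_equiv track=rewrite | github.com/RJPugsley/Dataset | Scripts/03_bpm_analysis/grid_mapping/stage5_classify_drum_hits.py | _sync_instrument_order
-- ===== SOURCE A (Python) =====
-- DEFAULT_ORDER = [
--     "kick","snare","clap","hihat","ride","crash","rim","tom",
--     "percussion","sub","bass_click","stab","woodblock","bell","glitch","fx","vocal"
-- ]
--
-- def _sync_instrument_order(instrument_tracks):
--     """Return a stable order: DEFAULT_ORDER first (if present), then any extras (sorted)."""
--     keys_present = list(instrument_tracks.keys())
--     seen = set()
--     ordered = []
--     for k in DEFAULT_ORDER: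
--         if k in instrument_tracks and k not in seen:
--             ordered.append(k); seen.add(k)
--     for k in sorted(keys_present):
--         if k not in seen:
--             ordered.append(k); seen.add(k)
--     return ordered
-- ===== SOURCE B (Python) =====
-- DEFAULT_ORDER = [
--     "kick","snare","clap","hihat","ride","crash","rim","tom",
--     "percussion","sub","bass_click","stab","woodblock","bell","glitch","fx","vocal"
-- ]
--
-- _RANK = {k: i for i, k in enumerate(DEFAULT_ORDER)}
-- _N = len(DEFAULT_ORDER)
--
-- def _sync_instrument_order(instrument_tracks):
--     """Single keyed sort: known names take (rank, name), extras take (len, name)."""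
--     return sorted(instrument_tracks, key=lambda k: (_RANK.get(k, _N), k))
-- ===== Notes on version B (the rewrite author's own statement) =====
-- stated objective: simpler
-- what changed: Replaces A's two passes (a DEFAULT_ORDER scan with a seen-set, then a scan of the sorted keys against the seen-set) by one sorted() call over the dict keys with the composite key (rank-in-DEFAULT_ORDER or len(DEFAULT_ORDER), name), so the seen-set and the second loop disappear.
import Mathlib
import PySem

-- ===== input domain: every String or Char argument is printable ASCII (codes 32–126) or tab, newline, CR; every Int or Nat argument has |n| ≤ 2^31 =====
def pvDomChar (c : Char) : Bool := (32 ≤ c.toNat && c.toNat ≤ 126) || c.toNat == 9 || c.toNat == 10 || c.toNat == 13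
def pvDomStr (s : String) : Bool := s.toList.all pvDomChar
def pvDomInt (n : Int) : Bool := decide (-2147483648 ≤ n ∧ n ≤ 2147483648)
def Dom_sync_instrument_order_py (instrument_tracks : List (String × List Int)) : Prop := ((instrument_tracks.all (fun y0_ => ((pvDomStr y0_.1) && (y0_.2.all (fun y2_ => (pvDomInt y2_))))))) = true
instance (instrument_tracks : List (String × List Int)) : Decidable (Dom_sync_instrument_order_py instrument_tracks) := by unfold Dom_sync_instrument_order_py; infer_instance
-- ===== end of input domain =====

-- B replaces A's two-pass partition (DEFAULT_ORDER scan with a seen-set, then a scan of the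
-- sorted keys) by a single keyed sort of the dict keys under the composite key (rank, name): simpler.


-- ===== PORT A =====
def DEFAULT_ORDER : List String :=
  ["kick","snare","clap","hihat","ride","crash","rim","tom",
   "percussion","sub","bass_click","stab","woodblock","bell","glitch","fx","vocal"]

def sync_instrument_order_py (instrument_tracks : List (String × List Int)) : List String :=
  -- keys_present = list(instrument_tracks.keys())  (dict keys: first occurrences, in order)
  let keys_present : List String := PySem.List.dedup (instrument_tracks.map Prod.fst)
  -- for k in DEFAULT_ORDER: if k in instrument_tracks and k not in seen: ordered.append(k); seen.add(k)
  let st1 : List String × PySem.Set String :=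
    DEFAULT_ORDER.foldl (fun st k =>
      if keys_present.contains k && !(PySem.Set.contains st.2 k)
      then (st.1 ++ [k], PySem.Set.add st.2 k) else st) ([], PySem.Set.empty)
  -- for k in sorted(keys_present): if k not in seen: ordered.append(k); seen.add(k)
  let st2 : List String × PySem.Set String :=
    (PySem.List.sorted keys_present (fun x => x) false).foldl (fun st k =>
      if !(PySem.Set.contains st.2 k)
      then (st.1 ++ [k], PySem.Set.add st.2 k) else st) st1
  st2.1

-- ===== PORT B =====
-- _RANK = {k: i for i, k in enumerate(DEFAULT_ORDER)}
def RANK_B : PySem.Dict String Int :=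
  PySem.Dict.ofList ((PySem.List.enumerate DEFAULT_ORDER).map (fun p => (p.2, p.1)))

-- sorted(instrument_tracks, key=lambda k: (_RANK.get(k, _N), k))
def sync_instrument_order_py_alt (instrument_tracks : List (String × List Int)) : List String :=
  PySem.List.sorted2 (PySem.List.dedup (instrument_tracks.map Prod.fst))
    (fun k => RANK_B.getD k ((DEFAULT_ORDER.length : Int))) (fun k => k) false

-- ===== PRECONDITION & SPEC =====
def Spec_sync_instrument_order_py (instrument_tracks : List (String × List Int)) (out : List String) : Prop := out = sync_instrument_order_py_alt instrument_tracks
instance (instrument_tracks : List (String × List Int)) (out : List String) : Decidable (Spec_sync_instrument_order_py instrument_tracks out) := by unfold Spec_sync_instrument_order_py; infer_instance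

-- ===== CLAIM (what is proved, stated in full; the proofs are below) =====
def Claim_equal_sync_instrument_order_py : Prop := ∀ (instrument_tracks : List (String × List Int)), Dom_sync_instrument_order_py instrument_tracks → Spec_sync_instrument_order_py instrument_tracks (sync_instrument_order_py instrument_tracks)

-- ===== LEMMAS AND PROOFS =====

-- the paired (ordered, seen) loop keeps its two components equal, so it is one list accumulator
theorem pv_foldl_pair_collapse (cond : List String → String → Bool)
    (hc : ∀ s k, cond s k = true → PySem.Set.contains s k = false) :
    ∀ (l : List String) (acc : List String),
    l.foldl (fun (st : List String × PySem.Set String) k =>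
        if cond st.2 k then (st.1 ++ [k], PySem.Set.add st.2 k) else st) (acc, acc)
      = (l.foldl (fun a k => if cond a k then a ++ [k] else a) acc,
         l.foldl (fun a k => if cond a k then a ++ [k] else a) acc) := by
  intro l
  induction l with
  | nil => intro acc; rfl
  | cons k t ih =>
    intro acc
    simp only [List.foldl_cons]
    by_cases h : cond acc k = true
    · rw [if_pos h, if_pos h]
      have hadd : PySem.Set.add acc k = acc ++ [k] := by
        have := hc acc k h
        simp [PySem.Set.add, PySem.Set.contains] at this ⊢
        simp [this]
      rw [hadd]; exact ih _
    · rw [if_neg h, if_neg h]; exact ih _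

-- loop 1: collecting the P-members of a duplicate-free list none of which is seen yet is filter P
theorem pv_foldl_filter (P : String → Bool) :
    ∀ (l : List String) (acc : List String), l.Nodup →
    (∀ x ∈ l, PySem.Set.contains acc x = false) →
    l.foldl (fun a k => if P k && !(PySem.Set.contains a k) then a ++ [k] else a) acc
      = acc ++ l.filter P := by
  intro l
  induction l with
  | nil => intro acc _ _; simp
  | cons k t ih =>
    intro acc hnd hacc
    have hk : PySem.Set.contains acc k = false := hacc k (by simp)
    have hk' : k ∉ acc := by simpa [PySem.Set.contains] using hk
    simp only [List.foldl_cons, List.filter_cons]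
    by_cases hP : P k = true
    · rw [if_pos (by simp [hP, hk']), hP]
      have := ih (acc ++ [k]) (by simp_all [List.nodup_cons])
        (by
          intro x hx
          have hxk : x ≠ k := fun he => (List.nodup_cons.mp hnd).1 (he ▸ hx)
          have := hacc x (by simp [hx])
          simp [PySem.Set.contains] at this ⊢
          simp [this, hxk])
      rw [this]; simp
    · rw [if_neg (by simp [hP]), Bool.not_eq_true] at *
      rw [hP]
      exact ih acc (List.nodup_cons.mp hnd).2 (fun x hx => hacc x (by simp [hx]))

-- loop 2: appending the not-yet-seen members of a duplicate-free list is filter (∉ acc)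
theorem pv_foldl_dedup_into :
    ∀ (l : List String) (acc : List String), l.Nodup →
    l.foldl (fun a k => if !(PySem.Set.contains a k) then a ++ [k] else a) acc
      = acc ++ l.filter (fun k => !(PySem.Set.contains acc k)) := by
  intro l
  induction l with
  | nil => intro acc _; simp
  | cons k t ih =>
    intro acc hnd
    simp only [List.foldl_cons, List.filter_cons]
    by_cases hk : PySem.Set.contains acc k = true
    · have hk' : k ∈ acc := by simpa [PySem.Set.contains] using hk
      rw [if_neg (by simp [hk']), ih acc (List.nodup_cons.mp hnd).2]
      simp [PySem.Set.contains, hk']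
    · rw [Bool.not_eq_true] at hk
      have hk' : k ∉ acc := by simpa [PySem.Set.contains] using hk
      rw [if_pos (by simp [hk']), ih (acc ++ [k]) (List.nodup_cons.mp hnd).2]
      have hcong : t.filter (fun x => !(PySem.Set.contains (acc ++ [k]) x))
          = t.filter (fun x => !(PySem.Set.contains acc x)) := by
        apply List.filter_congr
        intro x hx
        have hxk : x ≠ k := fun he => (List.nodup_cons.mp hnd).1 (he ▸ hx)
        simp [PySem.Set.contains, hxk]
      rw [hcong]
      simp [PySem.Set.contains, hk']

-- a tuple-key sort is a sort under the lexicographic product order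
theorem pv_sorted2_eq_sorted_lex {α : Type} (xs : List α) (k1 : α → Int) (k2 : α → String) :
    PySem.List.sorted2 xs k1 k2 false
      = PySem.List.sorted xs (fun x => toLex (k1 x, k2 x)) false := by
  unfold PySem.List.sorted2 PySem.List.sorted
  have hbefore : (fun a b => decide (k1 a < k1 b) || (!decide (k1 b < k1 a) && decide (k2 a < k2 b)))
      = (fun a b => decide (toLex (k1 a, k2 a) < toLex (k1 b, k2 b))) := by
    funext a b
    rcases lt_trichotomy (k1 a) (k1 b) with h | h | h
    · simp [Prod.Lex.toLex_lt_toLex, h]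
    · simp [Prod.Lex.toLex_lt_toLex, h]
    · have h1 : ¬ k1 a < k1 b := lt_asymm h
      have h2 : k1 a ≠ k1 b := ne_of_gt h
      simp [Prod.Lex.toLex_lt_toLex, h, h1, h2]
  exact congrArg (fun f => List.foldl (fun acc x => PySem.List.insertBy f x acc) [] xs) hbefore

theorem pv_rank_keys : RANK_B.keys = DEFAULT_ORDER := by decide

theorem pv_rank_out (b : String) (hb : b ∉ DEFAULT_ORDER) :
    RANK_B.getD b ((DEFAULT_ORDER.length : Int)) = (DEFAULT_ORDER.length : Int) := by
  have : RANK_B.get? b = none := by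
    rw [PySem.Dict.get?_eq_none_iff_not_mem_keys, pv_rank_keys]; exact hb
  simp [PySem.Dict.getD, this]

theorem pv_rank_in (a : String) (ha : a ∈ DEFAULT_ORDER) :
    RANK_B.getD a ((DEFAULT_ORDER.length : Int)) < (DEFAULT_ORDER.length : Int) := by
  fin_cases ha <;> decide

-- ===== VERDICT (by name: the statement is the Claim_ definition above) =====
theorem sync_instrument_order_py_spec : Claim_equal_sync_instrument_order_py := by
  intro it _
  unfold Spec_sync_instrument_order_py sync_instrument_order_py sync_instrument_order_py_alt
  set keys : List String := PySem.List.dedup (it.map Prod.fst) with hkeys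
  have hkeysnd : keys.Nodup := PySem.List.nodup_dedup _
  have hDnd : DEFAULT_ORDER.Nodup := by decide
  set Dfilt : List String := DEFAULT_ORDER.filter (fun k => keys.contains k) with hDf
  set Sfilt : List String :=
    (PySem.List.sorted keys (fun x => x) false).filter (fun k => !(PySem.Set.contains Dfilt k)) with hSf
  have hsortnd : (PySem.List.sorted keys (fun x => x) false).Nodup :=
    (PySem.List.sorted_perm keys (fun x => x) false).nodup_iff.mpr hkeysnd
  -- ===== the A side evaluates to Dfilt ++ Sfilt =====
  have hA : (((PySem.List.sorted keys (fun x => x) false).foldl (fun st k =>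
        if !(PySem.Set.contains st.2 k)
        then (st.1 ++ [k], PySem.Set.add st.2 k) else st)
        (DEFAULT_ORDER.foldl (fun st k =>
          if keys.contains k && !(PySem.Set.contains st.2 k)
          then (st.1 ++ [k], PySem.Set.add st.2 k) else st)
          (([], PySem.Set.empty) : List String × PySem.Set String))).1 : List String)
      = Dfilt ++ Sfilt := by
    have e0 : (([], PySem.Set.empty) : List String × PySem.Set String)
        = ((([] : List String), ([] : List String)) : List String × PySem.Set String) := rfl
    rw [e0, pv_foldl_pair_collapse (fun s k => keys.contains k && !(PySem.Set.contains s k))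
          (fun s k h => by
            rcases Bool.and_eq_true .. |>.mp h with ⟨_, h2⟩
            simpa using h2) DEFAULT_ORDER []]
    rw [pv_foldl_filter (fun k => keys.contains k) DEFAULT_ORDER [] hDnd (by intro x _; rfl)]
    simp only [List.nil_append]
    rw [pv_foldl_pair_collapse (fun s k => !(PySem.Set.contains s k))
          (fun s k h => by simpa using h) _ Dfilt]
    rw [pv_foldl_dedup_into _ Dfilt hsortnd]
  rw [hA, pv_sorted2_eq_sorted_lex]
  -- ===== the B side: the keyed sort is exactly that list =====
  have hmemD : ∀ x, x ∈ Dfilt ↔ x ∈ DEFAULT_ORDER ∧ x ∈ keys := by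
    intro x; simp [hDf, List.mem_filter]
  have hmemS : ∀ x, x ∈ Sfilt ↔ x ∈ keys ∧ x ∉ Dfilt := by
    intro x; simp [hSf, List.mem_filter, PySem.List.mem_sorted, PySem.Set.contains]
  have hSnotD : ∀ x ∈ Sfilt, x ∉ DEFAULT_ORDER := by
    intro x hx hD
    exact ((hmemS x).mp hx).2 ((hmemD x).mpr ⟨hD, ((hmemS x).mp hx).1⟩)
  symm
  apply PySem.List.sorted_eq_of_perm_of_pairwise_lt
  · -- permutation of the keys
    have hDfnd : Dfilt.Nodup := hDnd.filter _
    have hSfnd : Sfilt.Nodup := hsortnd.filter _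
    have hdisj : Dfilt.Disjoint Sfilt := by
      intro x hx hx'
      exact ((hmemS x).mp hx').2 hx
    apply (List.perm_ext_iff_of_nodup (List.Nodup.append hDfnd hSfnd hdisj) hkeysnd).mpr
    intro a
    constructor
    · intro ha
      rcases List.mem_append.mp ha with h | h
      · exact ((hmemD a).mp h).2
      · exact ((hmemS a).mp h).1
    · intro ha
      by_cases hD : a ∈ Dfilt
      · exact List.mem_append.mpr (Or.inl hD)
      · exact List.mem_append.mpr (Or.inr ((hmemS a).mpr ⟨ha, hD⟩))
  · -- strictly increasing under the composite key
    rw [List.pairwise_append]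
    refine ⟨?_, ?_, ?_⟩
    · have base : List.Pairwise (fun a b =>
          RANK_B.getD a ((DEFAULT_ORDER.length : Int)) < RANK_B.getD b ((DEFAULT_ORDER.length : Int)))
          DEFAULT_ORDER := by decide
      exact (base.sublist (List.filter_sublist)).imp
        (fun h => Prod.Lex.toLex_lt_toLex.mpr (Or.inl h))
    · have base : List.Pairwise (· < ·) (PySem.List.sorted keys (fun x => x) false) := by
        rw [hkeys, PySem.List.dedup_eq_ofList]
        exact PySem.List.sorted_ofList_pairwise_lt _
      refine (base.filter _).imp_of_mem ?_
      intro a b ha hb hlt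
      rw [← hSf] at ha hb
      exact Prod.Lex.toLex_lt_toLex.mpr (Or.inr
        ⟨by rw [pv_rank_out a (hSnotD a ha), pv_rank_out b (hSnotD b hb)], hlt⟩)
    · intro a ha b hb
      apply Prod.Lex.toLex_lt_toLex.mpr
      exact Or.inl (by
        rw [pv_rank_out b (hSnotD b hb)]
        exact pv_rank_in a ((hmemD a).mp ha).1)
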